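-- pv_equiv track=rewrite | github.com/choiire/NAND_WORK | nand_reset_blocks.py | get_two_plane_pairs
-- ===== SOURCE A (Python) =====
-- def get_two_plane_pairs(total_blocks: int) -> list:
--     """전체 블록에서 Two-plane 삭제 가능한 블록 쌍을 생성합니다.
--
--     Two-plane 조건:
--     - 두 블록은 서로 다른 플레인에 위치해야 함 (BA[6] 비트가 달라야 함)
--     - 두 블록의 페이지 오프셋은 동일해야 함 (일반적으로 첫 페이지 사용)
--
--     Args:
--         total_blocks: 전체 블록 수
--
--     Returns:
--         [(block1, block2), ...] 형태의 블록 쌍 리스트와 남은 단일 블록 리스트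
--     """
--     pairs = []
--     remaining_blocks = []
--
--     # 플레인별로 블록을 분류 (BA[6] 비트 기준)
--     plane0_blocks = []  # BA[6] = 0
--     plane1_blocks = []  # BA[6] = 1
--
--     for block in range(total_blocks):
--         if (block >> 6) & 1 == 0:  # BA[6] = 0
--             plane0_blocks.append(block)
--         else:  # BA[6] = 1
--             plane1_blocks.append(block)
--
--     # 각 플레인에서 동일한 인덱스의 블록들을 쌍으로 만들기
--     min_plane_size = min(len(plane0_blocks), len(plane1_blocks))
--
--     for i in range(min_plane_size):
--         pairs.append((plane0_blocks[i], plane1_blocks[i]))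
--
--     # 남은 블록들은 단일 블록으로 처리
--     if len(plane0_blocks) > min_plane_size:
--         remaining_blocks.extend(plane0_blocks[min_plane_size:])
--     if len(plane1_blocks) > min_plane_size:
--         remaining_blocks.extend(plane1_blocks[min_plane_size:])
--
--     return pairs, remaining_blocks
-- ===== SOURCE B (Python) =====
-- def get_two_plane_pairs(total_blocks: int) -> list:
--     """Single pass: each plane-1 block pairs with the block one plane-offset below it;
--     a plane-0 block is left over exactly when its would-be partner is beyond the range."""
--     pairs = []
--     remaining_blocks = []
--     for b in range(total_blocks):
--         if (b >> 6) & 1: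
--             pairs.append((b - 64, b))
--         elif b + 64 >= total_blocks:
--             remaining_blocks.append(b)
--     return pairs, remaining_blocks
-- ===== Notes on version B (the rewrite author's own statement) =====
-- stated objective: simpler
-- what changed: Replaces A's three passes (split blocks into per-plane lists by the plane bit, index-zip them up to the min length, then slice off the leftovers) with a single pass over the block range that emits a (partner, block) pair at each plane-1 block and a leftover at each plane-0 block whose would-be partner lies beyond the range.
import Mathlib
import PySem

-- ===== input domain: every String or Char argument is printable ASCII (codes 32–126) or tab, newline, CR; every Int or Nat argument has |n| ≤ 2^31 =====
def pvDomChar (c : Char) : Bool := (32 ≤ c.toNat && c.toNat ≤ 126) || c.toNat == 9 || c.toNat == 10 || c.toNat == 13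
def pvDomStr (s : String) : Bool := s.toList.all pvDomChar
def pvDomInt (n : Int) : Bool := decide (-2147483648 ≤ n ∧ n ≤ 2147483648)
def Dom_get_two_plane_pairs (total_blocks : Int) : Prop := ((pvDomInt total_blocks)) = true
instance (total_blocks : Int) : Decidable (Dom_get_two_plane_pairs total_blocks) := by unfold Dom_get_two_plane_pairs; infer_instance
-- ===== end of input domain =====

-- B replaces A's plane-splitting + min/zip/slice passes by one pass over the block range
-- (a plane-1 block always pairs with the block one plane-offset below it; a plane-0 block is
-- left over exactly when its would-be partner lies beyond the range): simpler.

-- ===== PORT A =====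
def get_two_plane_pairs (total_blocks : Int) : (List (Int × Int)) × List Int :=
  let pairs : List (Int × Int) := []
  let remaining_blocks : List Int := []
  -- for block in range(total_blocks): classify by BA[6]
  let planes : List Int × List Int :=
    (PySem.List.pyRange 0 total_blocks 1).foldl
      (fun (acc : List Int × List Int) (block : Int) =>
        if PySem.Int.band (block >>> (6:Nat)) 1 == 0 then (acc.1 ++ [block], acc.2)
        else (acc.1, acc.2 ++ [block]))
      ([], [])
  let plane0_blocks := planes.1
  let plane1_blocks := planes.2
  let min_plane_size : Int := min (plane0_blocks.length : Int) (plane1_blocks.length : Int)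
  let pairs :=
    (PySem.List.pyRange 0 min_plane_size 1).foldl
      (fun (acc : List (Int × Int)) i =>
        acc ++ [(PySem.List.pyGetD plane0_blocks i 0, PySem.List.pyGetD plane1_blocks i 0)])
      pairs
  let remaining_blocks :=
    if (plane0_blocks.length : Int) > min_plane_size then
      remaining_blocks ++ PySem.List.slice plane0_blocks (some min_plane_size)
    else remaining_blocks
  let remaining_blocks :=
    if (plane1_blocks.length : Int) > min_plane_size then
      remaining_blocks ++ PySem.List.slice plane1_blocks (some min_plane_size)
    else remaining_blocks
  (pairs, remaining_blocks)

-- ===== PORT B =====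
def get_two_plane_pairs_alt (total_blocks : Int) : (List (Int × Int)) × List Int :=
  (PySem.List.pyRange 0 total_blocks 1).foldl
    (fun (acc : List (Int × Int) × List Int) (b : Int) =>
      if PySem.Int.band (b >>> (6:Nat)) 1 != 0 then (acc.1 ++ [(b - 64, b)], acc.2)
      else if b + 64 ≥ total_blocks then (acc.1, acc.2 ++ [b])
      else acc)
    ([], [])

-- ===== PRECONDITION & SPEC =====
def Spec_get_two_plane_pairs (total_blocks : Int) (out : (List (Int × Int)) × List Int) : Prop := out = get_two_plane_pairs_alt total_blocks
instance (total_blocks : Int) (out : (List (Int × Int)) × List Int) : Decidable (Spec_get_two_plane_pairs total_blocks out) := by unfold Spec_get_two_plane_pairs; infer_instance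

-- ===== CLAIM (what is proved, stated in full; the proofs are below) =====
def Claim_equal_get_two_plane_pairs : Prop := ∀ (total_blocks : Int), Dom_get_two_plane_pairs total_blocks → Spec_get_two_plane_pairs total_blocks (get_two_plane_pairs total_blocks)

-- ===== LEMMAS AND PROOFS =====

-- the bit-6 test on a nonnegative block, as plain Nat arithmetic
theorem pv_bit6 (j : Nat) :
    (PySem.Int.band ((j:Int) >>> (6:Nat)) 1 == 0) = decide (j % 128 < 64) := by
  rw [← Int.natCast_shiftRight]
  rw [show (1:Int) = ((1:Nat):Int) from rfl, PySem.Int.band_natCast]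
  have h1 : (j >>> 6) &&& 1 = j / 64 % 2 := by
    simp [Nat.and_one_is_mod, Nat.shiftRight_eq_div_pow]
  rw [h1]
  rcases Nat.lt_or_ge (j % 128) 64 with h | h
  · have h2 : j / 64 % 2 = 0 := by omega
    simp [h2, h]
  · have h2 : j / 64 % 2 = 1 := by omega
    simp [h2]
    omega

-- A's classifying loop is a pair of filters
theorem pv_split_fold (p : Int → Bool) (l : List Int) (acc : List Int × List Int) :
    l.foldl (fun (acc : List Int × List Int) (block : Int) =>
        if p block then (acc.1 ++ [block], acc.2) else (acc.1, acc.2 ++ [block])) acc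
      = (acc.1 ++ l.filter p, acc.2 ++ l.filter (fun b => !p b)) := by
  induction l generalizing acc with
  | nil => simp
  | cons x xs ih =>
    simp only [List.foldl_cons, List.filter_cons]
    by_cases h : p x <;> simp [h, ih]

-- B's loop is a filter-map and a filter
theorem pv_b_fold (c1 : Int → Bool) (c2 : Int → Prop) [DecidablePred c2]
    (l : List Int) (acc : List (Int × Int) × List Int) :
    l.foldl (fun (acc : List (Int × Int) × List Int) (b : Int) =>
        if c1 b then (acc.1 ++ [(b - 64, b)], acc.2)
        else if c2 b then (acc.1, acc.2 ++ [b])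
        else acc) acc
      = (acc.1 ++ (l.filter c1).map (fun b => (b - 64, b)),
         acc.2 ++ l.filter (fun b => !c1 b && decide (c2 b))) := by
  induction l generalizing acc with
  | nil => simp
  | cons x xs ih =>
    simp only [List.foldl_cons, List.filter_cons]
    by_cases h1 : c1 x
    · simp [h1, ih]
    · by_cases h2 : c2 x <;> simp [h1, h2, ih]

-- indexing a plane-0 list with a partnerless tail against the shifted plane-1 list is B's pair list
theorem pv_pairs (B R : List Nat) :
    (List.range B.length).map (fun j =>
        (((B ++ R).map (fun k : Nat => (k:Int))).getD j 0,
         ((B.map (fun j => j + 64)).map (fun k : Nat => (k:Int))).getD j 0))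
      = List.map (fun b => (b - 64, b)) ((B.map (fun j => j + 64)).map (fun k : Nat => (k:Int))) := by
  induction B with
  | nil => simp
  | cons x B ih =>
    simp only [List.length_cons, List.range_succ_eq_map, List.map_cons, List.map_map,
      List.cons_append, List.getD_cons_zero]
    refine congrArg₂ List.cons (by norm_num) ?_
    have h2 : ∀ j ∈ List.range B.length,
        ((fun j => (((x:Int) :: List.map (fun k : Nat => (k:Int)) (B ++ R)).getD j 0,
            (((x + 64 : Nat):Int) :: List.map ((fun k : Nat => (k:Int)) ∘ fun j => j + 64) B).getD j 0)) ∘ Nat.succ) j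
        = ((List.map (fun k : Nat => (k:Int)) (B ++ R)).getD j 0,
            (List.map (fun k : Nat => (k:Int)) (List.map (fun j => j + 64) B)).getD j 0) := by
      intro j _
      simp [Function.comp]
    rw [List.map_congr_left h2, ih]
    simp [List.map_map]

-- the plane-1 blocks below m are the plane-0 blocks below m-64, shifted by 64
theorem pv_plane1 (m : Nat) :
    (List.range m).filter (fun j => !decide (j % 128 < 64))
      = ((List.range (m - 64)).filter (fun j => decide (j % 128 < 64))).map (fun j => j + 64) := by
  induction m with
  | zero => simp
  | succ m ih =>
    rw [List.range_succ, List.filter_append, ih]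
    by_cases h : m < 64
    · have e1 : m + 1 - 64 = 0 := by omega
      have e2 : m - 64 = 0 := by omega
      have hq : (!decide (m % 128 < 64)) = false := by simp; omega
      simp [e1, e2, hq]
    · have e1 : m + 1 - 64 = (m - 64) + 1 := by omega
      rw [e1, List.range_succ, List.filter_append, List.map_append]
      by_cases hb : m % 128 < 64
      · have hq : decide ((m - 64) % 128 < 64) = false := by simp; omega
        simp [hb, hq]
      · have hq : decide ((m - 64) % 128 < 64) = true := by simp; omega
        have e3 : m - 64 + 64 = m := by omega
        simp [hb, hq, e3]

-- the plane-0 blocks below m split into those with a partner and the tail without one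
theorem pv_plane0_split (m : Nat) :
    (List.range m).filter (fun j => decide (j % 128 < 64))
      = (List.range (m - 64)).filter (fun j => decide (j % 128 < 64))
        ++ (List.range m).filter (fun j => decide (j % 128 < 64) && decide (m ≤ j + 64)) := by
  have hsplit : List.range m
      = List.range (m - 64) ++ (List.range (m - (m - 64))).map (fun x => (m - 64) + x) := by
    rw [← List.range_add]; congr 1; omega
  have h1 : (List.range (m - 64)).filter (fun j => decide (j % 128 < 64) && decide (m ≤ j + 64)) = [] := by
    rw [List.filter_eq_nil_iff]
    intro a ha
    simp only [List.mem_range] at ha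
    simp only [Bool.and_eq_true, decide_eq_true_eq, not_and]
    intro _; omega
  have h2 : ((List.range (m - (m - 64))).map (fun x => (m - 64) + x)).filter
        (fun j => decide (j % 128 < 64) && decide (m ≤ j + 64))
      = ((List.range (m - (m - 64))).map (fun x => (m - 64) + x)).filter
        (fun j => decide (j % 128 < 64)) := by
    apply List.filter_congr
    intro x hx
    simp only [List.mem_map, List.mem_range] at hx
    obtain ⟨y, hy, rfl⟩ := hx
    have h3 : m ≤ (m - 64) + y + 64 := by omega
    simp [h3]
  rw [hsplit, List.filter_append, List.filter_append, h1, h2]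
  simp


-- ===== VERDICT (by name: the statement is the Claim_ definition above) =====
theorem get_two_plane_pairs_spec : Claim_equal_get_two_plane_pairs := by
  intro n _
  show get_two_plane_pairs n = get_two_plane_pairs_alt n
  by_cases hn : n ≤ 0
  · have hnil : PySem.List.pyRange 0 n = [] := by
      rw [List.eq_nil_iff_forall_not_mem]
      intro x hx
      rw [PySem.List.mem_pyRange_one] at hx
      omega
    have hnil0 : PySem.List.pyRange 0 (0:Int) = [] := by
      rw [List.eq_nil_iff_forall_not_mem]
      intro x hx
      rw [PySem.List.mem_pyRange_one] at hx
      omega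
    simp [get_two_plane_pairs, get_two_plane_pairs_alt, hnil, hnil0]
  · replace hn : 0 < n := lt_of_not_ge hn
    lift n to Nat using hn.le with m
    rw [get_two_plane_pairs, get_two_plane_pairs_alt, PySem.List.pyRange_zero_natCast]
    rw [pv_split_fold, pv_b_fold]
    simp only [List.nil_append, List.filter_map]
    have hq0 : ((fun block : Int => PySem.Int.band (block >>> (6:Nat)) 1 == 0) ∘ (fun k : Nat => (k:Int)))
        = (fun j : Nat => decide (j % 128 < 64)) := by
      funext j; simp [Function.comp, pv_bit6]
    have hq1 : ((fun b : Int => !(PySem.Int.band (b >>> (6:Nat)) 1 == 0)) ∘ (fun k : Nat => (k:Int)))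
        = (fun j : Nat => !decide (j % 128 < 64)) := by
      funext j; simp [Function.comp, pv_bit6]
    have hc1 : ((fun b : Int => PySem.Int.band (b >>> (6:Nat)) 1 != 0) ∘ (fun k : Nat => (k:Int)))
        = (fun j : Nat => !decide (j % 128 < 64)) := by
      funext j; simp [Function.comp, bne, pv_bit6]
    have hcr : ((fun b : Int => !(PySem.Int.band (b >>> (6:Nat)) 1 != 0) && decide ((m:Int) ≤ b + 64)) ∘ (fun k : Nat => (k:Int)))
        = (fun j : Nat => decide (j % 128 < 64) && decide (m ≤ j + 64)) := by
      funext j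
      simp only [Function.comp, bne, Bool.not_not, pv_bit6]
      congr 1
      rw [decide_eq_decide]
      omega
    rw [hq0, hq1, hc1, hcr]
    rw [pv_plane0_split m, pv_plane1 m]
    set B := (List.range (m - 64)).filter (fun j => decide (j % 128 < 64)) with hB
    set R := (List.range m).filter (fun j => decide (j % 128 < 64) && decide (m ≤ j + 64)) with hR
    simp only [List.length_map, List.length_append]
    have hmin : min ((B.length + R.length : Nat) : Int) (B.length : Int) = (B.length : Int) :=
      min_eq_right (by exact_mod_cast Nat.le_add_right _ _)
    rw [hmin]
    rw [if_neg (lt_irrefl _)]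
    rw [PySem.List.pyRange_zero_natCast, PySem.List.foldl_append_singleton_eq_map, List.map_map]
    refine Prod.ext ?_ ?_
    · show [] ++ _ = _
      have hfun : ((fun i : Int =>
            (PySem.List.pyGetD (List.map (fun k : Nat => (k:Int)) (B ++ R)) i 0,
             PySem.List.pyGetD (List.map (fun k : Nat => (k:Int)) (List.map (fun j => j + 64) B)) i 0)) ∘
          (fun k : Nat => (k:Int)))
          = (fun j : Nat =>
            ((List.map (fun k : Nat => (k:Int)) (B ++ R)).getD j 0,
             (List.map (fun k : Nat => (k:Int)) (List.map (fun j => j + 64) B)).getD j 0)) := by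
        funext j
        simp [Function.comp, PySem.List.pyGetD_natCast]
      rw [List.nil_append, hfun, pv_pairs]
    · show (if ((B.length + R.length : Nat) : Int) > (B.length : Int) then
          PySem.List.slice (List.map (fun k : Nat => (k:Int)) (B ++ R)) (some (B.length : Int))
        else []) = List.map (fun k : Nat => (k:Int)) R
      have hslice : PySem.List.slice (List.map (fun k : Nat => (k:Int)) (B ++ R)) (some (B.length : Int))
          = List.map (fun k : Nat => (k:Int)) R := by
        rw [PySem.List.slice_from _ (Int.natCast_nonneg _)]
        rw [List.map_append, Int.toNat_natCast]
        rw [show B.length = (List.map (fun k : Nat => (k:Int)) B).length by simp]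
        exact List.drop_left
      by_cases hcase : R = []
      · simp [hcase]
      · rw [if_pos (by exact_mod_cast Nat.lt_add_of_pos_right (List.length_pos_iff.mpr hcase)), hslice]
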